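/- GENERATED by mk_final_copies.py from the proof of the farm's unit `vorbis_decode_packet_rest.6` (farm:vorbis_decode_packet_rest.6.2: Lemmas.lean) as the
   re-elaboration sweep compiled it — do not edit. -/
import Asan.CheckWalk
import Vorbis.Spec.PacketRestFrame
import Vorbis.Spec.Units.vorbis_decode_packet_rest_6

open X86 X86.User Asan Vorbis Vorbis.Spec Vorbis.Spec.vorbis_decode_packet_rest

namespace Vorbis.Spec.vorbis_decode_packet_rest_6

variable {others : List Obj} {frames' : List (Nat × FrameLayout)} {len : Nat} {Ar : Arena} {stored room : Int}
  {ysz : Nat → Nat} {mem mem' : Mem} {f i : Nat}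

/-- **Where the block at `finalY[i]` lies** (a non-empty one): it is a setup block of the arena, hence 8-aligned, above the text,
below C00000H, and either below the stack region or at least 32 bytes above its end (the arena's first red zone). -/
theorem fy_where (hinv : DecodeInv others frames' len Ar stored room ysz mem f)
    (hi : (i : Int) < stb_vorbis.channels mem f) (hpos : 0 < ysz i) :
    Vorbis.L.textHi ≤ stb_vorbis.finalY mem f i ∧ stb_vorbis.finalY mem f i + ysz i ≤ 0xC00000 ∧
      (stb_vorbis.finalY mem f i + ysz i ≤ 0x700000 ∨ 0x800020 ≤ stb_vorbis.finalY mem f i) := by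
  have hb := (hinv.fy i hi).1
  have hA := hinv.arena
  have htext := hinv.arenaText
  rcases hinv.buf _ (SampleBuf.finalY i hi (ysz i) hb) with h0 | hblk
  · simp only [] at h0
    omega
  · have hr := hA.block_range (p := stb_vorbis.finalY mem f i) (n := ysz i) hblk
    have hl := le_r8 (ysz i)
    have h1 := hA.AR1
    have h1x := hA.AR1x
    have h2 := hA.AR2
    omega

/-- **The decode-time invariant over the stores of this segment**: a memory that differs from `mem` only in a window of the
stack region (the return addresses of the check calls) and inside the block at `finalY[i]` (the stores `finalY[j] = -1`).
`*f` is not touched at all (`ObjSame`), so `Bits`, M7, W1 and ADO are carried; no shadow byte is written. -/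
theorem inv_carry (hinv : DecodeInv others frames' len Ar stored room ysz mem f)
    (hi : (i : Int) < stb_vorbis.channels mem f) (hpos : 0 < ysz i) {slo shi : Nat} (h1 : 0x700000 ≤ slo)
    (h2 : shi ≤ 0x800000)
    (hs : Mem.SameExcept [⟨slo, shi⟩, ⟨stb_vorbis.finalY mem f i, stb_vorbis.finalY mem f i + ysz i⟩] mem mem') :
    DecodeInv others frames' len Ar stored room ysz mem' f ∧ ObjSame f mem mem' := by
  obtain ⟨ht, hc, hst⟩ := fy_where hinv hi hpos
  have hb := (hinv.fy i hi).1
  have hC : SampleBuf (RunBlk Ar len) mem f ⟨stb_vorbis.finalY mem f i, ysz i⟩ := SampleBuf.finalY i hi (ysz i) hb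
  have hdis := hinv.sep.bufobj _ hC
  have hoff := hinv.objOff
  have hobin := hinv.ok.inside _ hinv.ob1
  simp only [vblock, voff] at hdis hoff hobin
  -- where the two windows lie, relative to `*f`
  have hd : ∀ s, s ∈ [(⟨slo, shi⟩ : Span), ⟨stb_vorbis.finalY mem f i, stb_vorbis.finalY mem f i + ysz i⟩] →
      s.hi ≤ f ∨ f + 1808 ≤ s.lo := by
    intro s hsp
    simp only [List.mem_cons, List.mem_nil_iff, or_false] at hsp
    rcases hsp with rfl | rfl <;> simp only [] <;> omega
  have hos : ObjSame f mem mem' := by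
    apply ObjSame.of_sameExcept hs (by simp only [voff]; omega)
    intro s hsp
    have := hd s hsp
    omega
  refine ⟨?_, hos⟩
  apply hinv.frame_stores hs
  · -- every span is a decode-time store
    intro s hsp
    simp only [List.mem_cons, List.mem_nil_iff, or_false] at hsp
    rcases hsp with rfl | rfl
    · apply StoreOK.off
      intro B hB
      have := hinv.offStack B hB
      simp only []
      omega
    · exact StoreOK.buffer _ hC (Nat.le_refl _) (Nat.le_refl _)
  · -- the environment of a check site: no shadow byte was written
    apply hinv.fb.env.eqOn
    apply hs.eqOn
    intro s hsp
    simp only [List.mem_cons, List.mem_nil_iff, or_false] at hsp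
    rcases hsp with rfl | rfl <;> simp only [] <;> omega
  · -- ADO: the arena fields of `*f` are not written
    apply hinv.fb.ado.frame_stores hs (by simp only [voff]; omega)
    · intro s hsp
      have := hd s hsp
      omega
    · intro s hsp
      have := hd s hsp
      omega
  · intro _
    exact hinv.fb.vorbis.bits.frame hos
  · intro _
    exact hinv.fb.vorbis.buffers.M7.frame hos
  · intro _
    exact hinv.fb.vorbis.w1.frame hos

/-- `nOf` and `mapOf` read fields of `*f` only (the mode record `m = &f->mode_config[mode]` lies inside `*f`): they are the same in
a memory in which `*f` reads the same. -/
theorem nOf_mapOf_same {mode : Nat} (hos : ObjSame f mem mem') (hmode : mode < 64) :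
    nOf mem' f (stb_vorbis.mode_config_at f mode) = nOf mem f (stb_vorbis.mode_config_at f mode) ∧
      mapOf mem' f (stb_vorbis.mode_config_at f mode) = mapOf mem f (stb_vorbis.mode_config_at f mode) ∧
      stb_vorbis.channels mem' f = stb_vorbis.channels mem f := by
  have e0 : Mode.blockflag mem' (stb_vorbis.mode_config_at f mode) = Mode.blockflag mem (stb_vorbis.mode_config_at f mode) := by
    simp only [vacc, voff]
    exact hos.u8_at (484 + 6 * mode + 0)
      (InWins.of_mem (136, 1808) (by decide) (by simp only []; omega) (by simp only []; omega)) (by omega) (by omega)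
  have e1 : Mode.mapping mem' (stb_vorbis.mode_config_at f mode) = Mode.mapping mem (stb_vorbis.mode_config_at f mode) := by
    simp only [vacc, voff]
    exact hos.u8_at (484 + 6 * mode + 1)
      (InWins.of_mem (136, 1808) (by decide) (by simp only []; omega) (by simp only []; omega)) (by omega) (by omega)
  have e2 : stb_vorbis.blocksize_0 mem' f = stb_vorbis.blocksize_0 mem f := by
    simp only [vacc, voff]
    exact hos.i32 152 (by decide)
  have e3 : stb_vorbis.blocksize_1 mem' f = stb_vorbis.blocksize_1 mem f := by
    simp only [vacc, voff]
    exact hos.i32 156 (by decide)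
  have e4 : stb_vorbis.mapping mem' f = stb_vorbis.mapping mem f := by
    simp only [vacc, voff]
    exact hos.ptr 472 (by decide)
  have e5 : stb_vorbis.channels mem' f = stb_vorbis.channels mem f := by
    simp only [vacc, voff]
    exact hos.i32 4 (by decide)
  refine ⟨?_, ?_, e5⟩
  · unfold nOf bsize
    rw [e0, e2, e3]
  · unfold mapOf stb_vorbis.mapping_at
    rw [e1, e4]

/-- **STABLE over the stores of this segment.** A state `w` with the steady stack pointer and the ABI invariant whose memory
differs from that of `v` (where STABLE holds) only in the eight bytes below the steady stack pointer (the return addresses of the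
check calls) and inside the block at `finalY[i]`: STABLE holds at `w`, and `f->channels` and `map` read the same. -/
theorem stable_carry {u₀ : State} {frames : List (Nat × FrameLayout)} {mode : Nat} {e : State} {ret : Word} {ls : Int}
    {v w : State} (hst : Stable u₀ others frames len Ar stored room mode ysz e ret ls v)
    (hi : (i : Int) < stb_vorbis.channels v.mem (fOf e)) (hpos : 0 < ysz i)
    (hrsp : w.reg .rsp = spOf e) (habi : abiInv w)
    (hs : Mem.SameExcept [⟨(e.reg .rsp).toNat - 3008, (e.reg .rsp).toNat - 3000⟩,
      ⟨stb_vorbis.finalY v.mem (fOf e) i, stb_vorbis.finalY v.mem (fOf e) i + ysz i⟩] v.mem w.mem) :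
    Stable u₀ others frames len Ar stored room mode ysz e ret ls w ∧
      stb_vorbis.channels w.mem (fOf e) = stb_vorbis.channels v.mem (fOf e) ∧
      mapOf w.mem (fOf e) (mOf e) = mapOf v.mem (fOf e) (mOf e) := by
  have he_room : 0x700000 + 3856 ≤ (e.reg .rsp).toNat := hst.entry.room
  have he_top : (e.reg .rsp).toNat + 8 ≤ 0x800000 := hst.entry.top
  obtain ⟨hsh, hinv0, hargs⟩ := hst.pre
  obtain ⟨hinv', hos⟩ := inv_carry hst.inv hi hpos (slo := (e.reg .rsp).toNat - 3008) (shi := (e.reg .rsp).toNat - 3000)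
    (by omega) (by omega) hs
  obtain ⟨ht, hc, hstk⟩ := fy_where hst.inv hi hpos
  -- a read in the function's frame or in its stack arguments is not affected
  have hread : ∀ (a : Word) (k : Nat), (e.reg .rsp).toNat - 3000 ≤ a.toNat → a.toNat + k ≤ (e.reg .rsp).toNat + 24 →
      w.mem.readLE a k = v.mem.readLE a k := by
    intro a k h1 h2
    apply hs.readLE a k (by omega)
    intro s hsp
    simp only [List.mem_cons, List.mem_nil_iff, or_false] at hsp
    rcases hsp with rfl | rfl <;> simp only [] <;> omega
  -- the mode index is below 64 (MD1), so `m` lies inside `*f`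
  have hmode : mode < 64 := by
    have h1 := hargs.mode_lt
    have h2 := hinv0.fb.vorbis.mode.MD1.2
    omega
  have hm : mOf e = stb_vorbis.mode_config_at (fOf e) mode := hargs.m_eq
  obtain ⟨en, emap, ech⟩ := nOf_mapOf_same hos hmode
  rw [← hm] at en emap
  refine ⟨?_, ech, emap⟩
  -- the shadow region is not written
  have hun : ShadowUntouched v.mem w.mem := by
    apply hs.eqOn
    intro s hsp
    simp only [List.mem_cons, List.mem_nil_iff, or_false] at hsp
    rcases hsp with rfl | rfl <;> simp only [] <;> omega
  -- the caller's `int` at `p_left` lies above the return address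
  have hleft : (e.reg .rsp).toNat + 8 ≤ pLeftOf e ∧ pLeftOf e + 4 ≤ 0x800000 := by
    obtain ⟨hl, h1, h2⟩ := hargs.left_obj
    have := hl.above hsh.inv
    omega
  refine { entry := hst.entry, pre := hst.pre, rsp := hrsp, code := ?code, abi := habi, same := ?same, ra := ?ra,
           s_r15 := ?s15, s_r14 := ?s14, s_r13 := ?s13, s_r12 := ?s12, s_rbp := ?sbp, s_rbx := ?sbx,
           shadow := hst.shadow.untouched hun, inv := hinv',
           slot_f := ?sf, slot_len := ?slen, slot_m := ?sm, slot_ls := ?sls, slot_rs := ?srs, slot_n := ?sn,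
           slot_n2 := ?sn2, slot_sb := ?ssb, arg_re := ?are, arg_left := ?aleft, left_val := ?lval }
  case code =>
    have e1 : Vorbis.L.textHi = 0x119d40 := rfl
    have e2 : Vorbis.L.textLo = 0x100000 := rfl
    apply Mem.EqOn.trans hst.code
    apply hs.eqOn
    intro s hsp
    simp only [List.mem_cons, List.mem_nil_iff, or_false] at hsp
    rcases hsp with rfl | rfl <;> simp only [] <;> omega
  case ra =>
    rw [hread _ _ (by u_omega) (by u_omega)]
    exact hst.ra
  case s15 =>
    rw [hread _ _ (by u_omega) (by u_omega)]
    exact hst.s_r15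
  case s14 =>
    rw [hread _ _ (by u_omega) (by u_omega)]
    exact hst.s_r14
  case s13 =>
    rw [hread _ _ (by u_omega) (by u_omega)]
    exact hst.s_r13
  case s12 =>
    rw [hread _ _ (by u_omega) (by u_omega)]
    exact hst.s_r12
  case sbp =>
    rw [hread _ _ (by u_omega) (by u_omega)]
    exact hst.s_rbp
  case sbx =>
    rw [hread _ _ (by u_omega) (by u_omega)]
    exact hst.s_rbx
  case sf =>
    unfold slot64
    rw [hread _ _ (by u_omega) (by u_omega)]
    exact hst.slot_f
  case slen =>
    unfold slot64
    rw [hread _ _ (by u_omega) (by u_omega)]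
    exact hst.slot_len
  case sm =>
    unfold slot64
    rw [hread _ _ (by u_omega) (by u_omega)]
    exact hst.slot_m
  case sls =>
    unfold slot32
    rw [hread _ _ (by u_omega) (by u_omega)]
    exact hst.slot_ls
  case srs =>
    unfold slot32
    rw [hread _ _ (by u_omega) (by u_omega)]
    exact hst.slot_rs
  case sn =>
    unfold slot32
    rw [hread _ _ (by u_omega) (by u_omega), en]
    exact hst.slot_n
  case sn2 =>
    unfold slot32
    rw [hread _ _ (by u_omega) (by u_omega), en]
    exact hst.slot_n2
  case ssb =>
    unfold slot64
    rw [hread _ _ (by u_omega) (by u_omega)]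
    exact hst.slot_sb
  case are =>
    rw [hread _ _ (by u_omega) (by u_omega)]
    exact hst.arg_re
  case aleft =>
    rw [hread _ _ (by u_omega) (by u_omega)]
    exact hst.arg_left
  case lval =>
    have ea : (addr (pLeftOf e)).toNat = pLeftOf e := toNat_addr _ (by omega)
    have er : w.mem.readLE (addr (pLeftOf e)) 4 = v.mem.readLE (addr (pLeftOf e)) 4 := by
      apply hs.readLE _ _ (by omega)
      intro s hsp
      simp only [List.mem_cons, List.mem_nil_iff, or_false] at hsp
      rcases hsp with rfl | rfl <;> simp only [] <;> omega
    have := hst.left_val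
    unfold Mem.i32 Mem.u32 at this ⊢
    rw [er]
    exact this
  case same =>
    -- the block at `finalY[i]` is the one of the entry memory: `*f` is as at the entry outside its decode-time holes
    have hd0 : DecodeSame (fOf e) e.mem v.mem :=
      StoreOK.decodeSame hinv0.ok hinv0.ob1 hinv0.sep hst.same (fun s hsp => footprint_storeOK hst.pre he_room s hsp)
    obtain ⟨ech, _, eptr⟩ := ConfigOK.buffers_eq (hd0.sub ConfigOK.wins_decode) hinv0.config.header.HD1.2
    rw [ech] at hi
    have efy := (eptr i hi).2.2
    apply Mem.SameExcept.step_same hst.same hs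
    intro s hsp a h1 h2
    apply covered_footprint
    simp only [List.mem_cons, List.mem_nil_iff, or_false] at hsp
    rcases hsp with rfl | rfl
    · left
      simp only [] at h1 h2
      omega
    · right
      right
      left
      simp only [] at h1 h2
      refine ⟨i, ?_, ?_, ?_⟩
      · unfold nchan
        omega
      · rw [← efy]
        exact h1
      · rw [← efy]
        exact h2

/-- **`g->values`, the loop bound, as the loop head's unchecked load reads it** (`cmp [r15 + 0x638], ebx`): a number `V`,
`2 ≤ V ≤ 250` (FL8), with `2·V` bytes in the block at `finalY[i]` (FY1); the load reads `V` in every memory that differs from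
`mem` only in a window of the stack region and inside the block at `finalY[i]` (SEP: the floor block is apart from the sample
buffers). -/
theorem values_read (hinv : DecodeInv others frames' len Ar stored room ysz mem f)
    (hi : (i : Int) < stb_vorbis.channels mem f) {g : Nat} (hg : IsFloor mem f g) {r : Word} (hr : r.toNat = g) :
    ∃ V : Nat, 2 ≤ V ∧ V ≤ 250 ∧ 2 * V ≤ ysz i ∧ 0x100000 ≤ g ∧ g + 1596 ≤ 0xC00000 ∧
      ∀ (mem' : Mem) (slo shi : Nat), 0x700000 ≤ slo → shi ≤ 0x800000 →
        Mem.SameExcept [⟨slo, shi⟩, ⟨stb_vorbis.finalY mem f i, stb_vorbis.finalY mem f i + ysz i⟩] mem mem' →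
        mem'.readLE (r + 1592) 4 = V := by
  have hfl := hinv.fb.vorbis.floor
  have hok := hinv.ok
  have hins := hfl.toFloorShape.elem_inside hg hok
  have hin := hfl.toFloorShape.elem_in hg (off := 1592) (n := 4) (by simp only [voff]; omega)
  have hoffst := hinv.offStack _ hfl.FL2
  obtain ⟨idx, hidx, hgeq⟩ := hg
  have hvb := (hfl.floors idx hidx).values_bounds
  have hsz := (hinv.fy i hi).2 idx hidx
  rw [← hgeq] at hvb hsz
  have hb := (hinv.fy i hi).1
  have hC : SampleBuf (RunBlk Ar len) mem f ⟨stb_vorbis.finalY mem f i, ysz i⟩ := SampleBuf.finalY i hi (ysz i) hb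
  have hdis := hinv.sep.buf _ ConfigOK.Reads.floor _ hC
  simp only [vblock, voff] at hdis hin hoffst hins
  -- the raw dword is the value
  have hraw : mem.readLE (addr (g + 1592)) 4 = (Floor1.values mem g).toNat := by
    have hlt := mem.u32_lt (g + 1592)
    have hc := sint32_cases (mem.u32 (g + 1592))
    have hv : Floor1.values mem g = sint32 (mem.u32 (g + 1592)) := by
      simp only [vacc, voff]
      rfl
    rw [hv] at hvb ⊢
    show mem.u32 (g + 1592) = _
    omega
  have ea : r + 1592 = addr (g + 1592) := by
    rw [← hr, ← addr_add_lit, addr_toNat]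
  refine ⟨(Floor1.values mem g).toNat, by omega, by omega, by omega, hins.1, hins.2, ?_⟩
  intro mem' slo shi h1 h2 hs
  have eaN : (addr (g + 1592)).toNat = g + 1592 := toNat_addr _ (by omega)
  rw [ea, ← hraw]
  apply hs.readLE _ _ (by omega)
  intro s hsp
  simp only [List.mem_cons, List.mem_nil_iff, or_false] at hsp
  rcases hsp with rfl | rfl <;> simp only [] <;> omega

/-! ### The 32-bit loop counter `ebx = j` -/

/-- A zero-extended 32-bit load of a small number (`mov r14d, [rsp + 0x38]`) is the number. -/
theorem zext32_small (n : Nat) (h : n < 2 ^ 32) : Word.ofBV (BitVec.ofNat 32 n) = UInt64.ofNat n := by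
  apply UInt64.toNat_inj.mp
  rw [toNat_ofBV32, toNat_ofNat32 n h, UInt64.toNat_ofNat']
  omega

/-- The low half of a small counter held in a register is the counter. -/
theorem part32_counter (j : Nat) (h : j < 2 ^ 31) : (Word.part Width.w32 (UInt64.ofNat j)).toNat = j := by
  rw [Asan.part32_toNat, UInt64.toNat_ofNat']
  omega

/-- `movsxd rbp, ebx` of a small counter: the counter. -/
theorem sext_counter (j : Nat) (h : j < 2 ^ 31) :
    (Word.ofBV (BitVec.signExtend 64 (Word.part Width.w32 (UInt64.ofNat j)))).toNat = j := by
  rw [toNat_sext32 _ (by rw [part32_counter j h]; exact h), part32_counter j h]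

/-- `add ebx, 1` of a small counter: the next counter. -/
theorem succ_counter (j : Nat) (h : j < 2 ^ 31) :
    Word.ofBV (Word.part Width.w32 (UInt64.ofNat j) + 1#32) = UInt64.ofNat (j + 1) := by
  apply UInt64.toNat_inj.mp
  rw [toNat_ofBV32, BitVec.toNat_add, part32_counter j h, UInt64.toNat_ofNat']
  have e1 : (1#32).toNat = 1 := by decide
  rw [e1]
  omega

/-- The signed compare `cmp [g->values], ebx ; jle`: for small numbers it compares the numbers. -/
theorem cmp_counter (V j : Nat) (hV : V < 2 ^ 31) (h : j < 2 ^ 31) :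
    ((BitVec.ofNat 32 V).toInt ≤ (Word.part Width.w32 (UInt64.ofNat j)).toInt) ↔ V ≤ j := by
  rw [toInt_of_lt _ (by rw [toNat_ofNat32 V (by omega)]; exact hV), toNat_ofNat32 V (by omega),
    toInt_of_lt _ (by rw [part32_counter j h]; exact h), part32_counter j h]
  omega

end Vorbis.Spec.vorbis_decode_packet_rest_6
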